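-- pv_equiv track=rewrite | github.com/the-brainiac/contests | codechef/cook128/problem2.py | findAndSum
-- ===== SOURCE A (Python) =====
-- def findAndSum(arr, n):
-- 	Sum = 0
-- 	mul = 1
--
-- 	for i in range(30):
-- 		count_on = 0
-- 		l = 0
-- 		for j in range(n):
--
-- 			if ((arr[j] & (1 << i)) > 0):
-- 				if (count_on):
-- 					l += 1
-- 				else:
-- 					count_on = 1
-- 					l += 1
--
-- 			elif (count_on):
-- 				Sum |= ((mul * l * (l + 1)) // 2)
-- 				count_on = 0
-- 				l = 0
--
-- 		if (count_on):
-- 			Sum |= ((mul * l * (l + 1)) // 2)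
-- 			count_on = 0
-- 			l = 0
--
-- 		mul *= 2
--
-- 	return Sum
-- ===== SOURCE B (Python) =====
-- def findAndSum(arr, n):
--     run = [0] * 30
--     Sum = 0
--     for j in range(n):
--         x = arr[j]
--         for i in range(30):
--             if x & (1 << i):
--                 run[i] += 1
--             elif run[i]:
--                 Sum |= (1 << i) * run[i] * (run[i] + 1) // 2
--                 run[i] = 0
--     for i in range(30):
--         if run[i]:
--             Sum |= (1 << i) * run[i] * (run[i] + 1) // 2
--     return Sum
-- ===== Notes on version B (the rewrite author's own statement) =====
-- stated objective: alternative
-- what changed: A scans the array 30 times, once per bit, with a fresh run-length state machine per scan; B makes a single forward pass maintaining a 30-entry array of current per-bit run lengths, ORing each run's triangular contribution at its set-to-clear transition and flushing open runs once at the end.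
import Mathlib
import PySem

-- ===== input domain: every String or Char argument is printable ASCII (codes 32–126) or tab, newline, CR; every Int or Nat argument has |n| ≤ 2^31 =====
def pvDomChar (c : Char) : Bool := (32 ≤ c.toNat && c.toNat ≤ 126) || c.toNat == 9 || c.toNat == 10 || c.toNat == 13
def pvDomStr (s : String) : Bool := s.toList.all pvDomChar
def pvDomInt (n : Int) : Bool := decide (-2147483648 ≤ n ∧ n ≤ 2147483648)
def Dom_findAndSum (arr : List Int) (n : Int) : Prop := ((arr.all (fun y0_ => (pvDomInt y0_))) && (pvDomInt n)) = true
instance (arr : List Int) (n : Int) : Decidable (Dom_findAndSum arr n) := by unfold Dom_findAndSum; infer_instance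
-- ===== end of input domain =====

-- B replaces A's 30 separate per-bit scans of the array by one forward pass that maintains a
-- 30-entry array of current per-bit run lengths (objective: alternative decomposition, same cost).

-- ===== PORT A =====
-- inner-loop body of A: state (Sum, count_on, l); `arr[j] & (1 << i)` is PySem.Int.band / <<<
def aStep (mul : Int) (i : Nat) (x : Int) (st : Int × Int × Int) : Int × Int × Int :=
  if 0 < PySem.Int.band x ((1:Int) <<< i) then
    if st.2.1 ≠ 0 then (st.1, st.2.1, st.2.2 + 1)
    else (st.1, 1, st.2.2 + 1)
  else if st.2.1 ≠ 0 then
    (PySem.Int.bor st.1 (PySem.Int.floordiv (mul * st.2.2 * (st.2.2 + 1)) 2), 0, 0)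
  else st

-- the `if (count_on): Sum |= …` after the inner loop
def aFlush (mul : Int) (st : Int × Int × Int) : Int :=
  if st.2.1 ≠ 0 then PySem.Int.bor st.1 (PySem.Int.floordiv (mul * st.2.2 * (st.2.2 + 1)) 2)
  else st.1

-- `for i in range(30)` (a constant range of Nats) is List.range 30; `for j in range(n)` is
-- PySem.List.pyRange; arr[j] is pyGetD (in range whenever Pre_ holds; Python raises outside Pre_)
def findAndSum (arr : List Int) (n : Int) : Int :=
  ((List.range 30).foldl (fun acc i =>
      (aFlush acc.2 ((PySem.List.pyRange 0 n 1).foldl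
          (fun st j => aStep acc.2 i (PySem.List.pyGetD arr j 0) st) (acc.1, 0, 0)),
       acc.2 * 2)) ((0:Int), (1:Int))).1

-- ===== PORT B =====
-- B's inner `for i in range(30)` walks the 30-entry run array: recursion over the run list,
-- i the current bit index; returns (new Sum, new run list)
def bStepRow (x : Int) : Nat → List Int → Int → Int × List Int
  | _, [], Sum => (Sum, [])
  | i, r :: rs, Sum =>
    if PySem.Int.band x ((1:Int) <<< i) ≠ 0 then
      let p := bStepRow x (i+1) rs Sum
      (p.1, (r + 1) :: p.2)
    else if r ≠ 0 then
      let p := bStepRow x (i+1) rs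
        (PySem.Int.bor Sum (PySem.Int.floordiv (((1:Int) <<< i) * r * (r + 1)) 2))
      (p.1, (0:Int) :: p.2)
    else
      let p := bStepRow x (i+1) rs Sum
      (p.1, r :: p.2)

-- B's final flush loop over the run array
def bFlush : Nat → List Int → Int → Int
  | _, [], Sum => Sum
  | i, r :: rs, Sum =>
    if r ≠ 0 then
      bFlush (i+1) rs (PySem.Int.bor Sum (PySem.Int.floordiv (((1:Int) <<< i) * r * (r + 1)) 2))
    else bFlush (i+1) rs Sum

def findAndSum_alt (arr : List Int) (n : Int) : Int :=
  let st := (PySem.List.pyRange 0 n 1).foldl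
      (fun st j => bStepRow (PySem.List.pyGetD arr j 0) 0 st.2 st.1)
      ((0:Int), List.replicate 30 (0:Int))
  bFlush 0 st.2 st.1

-- ===== PRECONDITION & SPEC =====
-- Pre_ excludes n > len(arr), on which Python A (and B) raise IndexError at arr[j]; n < 0 is fine (empty range).
def Pre_findAndSum (arr : List Int) (n : Int) : Prop := n ≤ (arr.length : Int)
instance (arr : List Int) (n : Int) : Decidable (Pre_findAndSum arr n) := by unfold Pre_findAndSum; infer_instance
def pvWitness_findAndSum : List Int × Int := ([5, 7, 2], 3)

def Spec_findAndSum (arr : List Int) (n : Int) (out : Int) : Prop := out = findAndSum_alt arr n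
instance (arr : List Int) (n : Int) (out : Int) : Decidable (Spec_findAndSum arr n out) := by unfold Spec_findAndSum; infer_instance

-- ===== CLAIM (what is proved, stated in full; the proofs are below) =====
def Claim_equal_findAndSum : Prop := ∀ (arr : List Int) (n : Int), Dom_findAndSum arr n → Pre_findAndSum arr n → Spec_findAndSum arr n (findAndSum arr n)

-- ===== LEMMAS AND PROOFS =====

-- the common model: per-bit run decomposition, all values nonnegative

def pvBit (x : Int) (i : Nat) : Bool := PySem.Int.band x ((1:Int) <<< i) ≠ 0

def pvC (w l : Int) : Int := PySem.Int.floordiv (w * l * (l + 1)) 2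

-- total OR-contribution of bit i (weight w) over xs, starting in an open run of length l
def pvRuns (i : Nat) (w : Int) : List Int → Int → Int
  | [], l => if l ≠ 0 then pvC w l else 0
  | x :: t, l =>
    if pvBit x i then pvRuns i w t (l + 1)
    else PySem.Int.bor (if l ≠ 0 then pvC w l else 0) (pvRuns i w t 0)

-- OR over the bits i, i+1, … of pvRuns, one per entry of the run list
def pvBig (xs : List Int) : Nat → List Int → Int
  | _, [] => 0
  | i, r :: rs => PySem.Int.bor (pvRuns i ((1:Int) <<< i) xs r) (pvBig xs (i+1) rs)

-- OR-delta and run-list update contributed by one element of xs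
def pvOrD (x : Int) : Nat → List Int → Int
  | _, [] => 0
  | i, r :: rs =>
    PySem.Int.bor (if pvBit x i then 0 else if r ≠ 0 then pvC ((1:Int) <<< i) r else 0)
      (pvOrD x (i+1) rs)

def pvUpd (x : Int) : Nat → List Int → List Int
  | _, [] => []
  | i, r :: rs => (if pvBit x i then r + 1 else 0) :: pvUpd x (i+1) rs

def pvFlushOr : Nat → List Int → Int
  | _, [] => 0
  | i, r :: rs => PySem.Int.bor (if r ≠ 0 then pvC ((1:Int) <<< i) r else 0) (pvFlushOr (i+1) rs)

-- equation lemmas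

theorem pvRuns_nil (i : Nat) (w l : Int) :
    pvRuns i w [] l = if l ≠ 0 then pvC w l else 0 := rfl
theorem pvRuns_cons (i : Nat) (w x l : Int) (t : List Int) :
    pvRuns i w (x :: t) l =
      if pvBit x i then pvRuns i w t (l + 1)
      else PySem.Int.bor (if l ≠ 0 then pvC w l else 0) (pvRuns i w t 0) := rfl
theorem pvBig_nil (xs : List Int) (i : Nat) : pvBig xs i [] = 0 := rfl
theorem pvBig_consr (xs : List Int) (i : Nat) (r : Int) (rs : List Int) :
    pvBig xs i (r :: rs)
      = PySem.Int.bor (pvRuns i ((1:Int) <<< i) xs r) (pvBig xs (i+1) rs) := rfl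
theorem pvOrD_nil (x : Int) (i : Nat) : pvOrD x i [] = 0 := rfl
theorem pvOrD_cons (x : Int) (i : Nat) (r : Int) (rs : List Int) :
    pvOrD x i (r :: rs)
      = PySem.Int.bor (if pvBit x i then 0 else if r ≠ 0 then pvC ((1:Int) <<< i) r else 0)
          (pvOrD x (i+1) rs) := rfl
theorem pvUpd_nil (x : Int) (i : Nat) : pvUpd x i [] = [] := rfl
theorem pvUpd_cons (x : Int) (i : Nat) (r : Int) (rs : List Int) :
    pvUpd x i (r :: rs) = (if pvBit x i then r + 1 else 0) :: pvUpd x (i+1) rs := rfl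
theorem pvFlushOr_nil (i : Nat) : pvFlushOr i [] = 0 := rfl
theorem pvFlushOr_cons (i : Nat) (r : Int) (rs : List Int) :
    pvFlushOr i (r :: rs)
      = PySem.Int.bor (if r ≠ 0 then pvC ((1:Int) <<< i) r else 0) (pvFlushOr (i+1) rs) := rfl
theorem bStepRow_nil (x : Int) (i : Nat) (S : Int) : bStepRow x i [] S = (S, []) := rfl
theorem bStepRow_cons (x : Int) (i : Nat) (r : Int) (rs : List Int) (S : Int) :
    bStepRow x i (r :: rs) S =
      if PySem.Int.band x ((1:Int) <<< i) ≠ 0 then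
        ((bStepRow x (i+1) rs S).1, (r + 1) :: (bStepRow x (i+1) rs S).2)
      else if r ≠ 0 then
        ((bStepRow x (i+1) rs
            (PySem.Int.bor S (PySem.Int.floordiv (((1:Int) <<< i) * r * (r + 1)) 2))).1,
         (0:Int) :: (bStepRow x (i+1) rs
            (PySem.Int.bor S (PySem.Int.floordiv (((1:Int) <<< i) * r * (r + 1)) 2))).2)
      else ((bStepRow x (i+1) rs S).1, r :: (bStepRow x (i+1) rs S).2) := rfl
theorem bFlush_nil (i : Nat) (S : Int) : bFlush i [] S = S := rfl
theorem bFlush_cons (i : Nat) (r : Int) (rs : List Int) (S : Int) :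
    bFlush i (r :: rs) S =
      if r ≠ 0 then
        bFlush (i+1) rs (PySem.Int.bor S (PySem.Int.floordiv (((1:Int) <<< i) * r * (r + 1)) 2))
      else bFlush (i+1) rs S := rfl

-- basic OR facts (restricted to nonnegative arguments, which is all we ever OR)

theorem pv_shl_nonneg (i : Nat) : 0 ≤ (1:Int) <<< i := by simp [Int.shiftLeft_eq]

theorem pv_zero_bor (a : Int) : PySem.Int.bor 0 a = a := by
  rw [PySem.Int.bor_comm]; exact PySem.Int.bor_zero a

theorem pv_bor_nonneg {a b : Int} (ha : 0 ≤ a) (hb : 0 ≤ b) : 0 ≤ PySem.Int.bor a b := by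
  rw [PySem.Int.bor_of_nonneg ha hb]; exact Int.natCast_nonneg _

theorem pv_bor_assoc {a b c : Int} (ha : 0 ≤ a) (hb : 0 ≤ b) (hc : 0 ≤ c) :
    PySem.Int.bor (PySem.Int.bor a b) c = PySem.Int.bor a (PySem.Int.bor b c) := by
  rw [PySem.Int.bor_of_nonneg ha hb, PySem.Int.bor_of_nonneg hb hc,
    PySem.Int.bor_of_nonneg (a := ((a.toNat ||| b.toNat : Nat) : Int)) (Int.natCast_nonneg _) hc,
    PySem.Int.bor_of_nonneg ha (b := ((b.toNat ||| c.toNat : Nat) : Int)) (Int.natCast_nonneg _)]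
  simp [Nat.lor_assoc]

theorem pv_bor_bor_bor {a b c d : Int} (ha : 0 ≤ a) (hb : 0 ≤ b) (hc : 0 ≤ c) (hd : 0 ≤ d) :
    PySem.Int.bor (PySem.Int.bor a b) (PySem.Int.bor c d)
      = PySem.Int.bor (PySem.Int.bor a c) (PySem.Int.bor b d) := by
  rw [PySem.Int.bor_of_nonneg ha hb, PySem.Int.bor_of_nonneg hc hd,
    PySem.Int.bor_of_nonneg ha hc, PySem.Int.bor_of_nonneg hb hd,
    PySem.Int.bor_of_nonneg (a := ((a.toNat ||| b.toNat : Nat) : Int)) (Int.natCast_nonneg _)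
      (Int.natCast_nonneg _),
    PySem.Int.bor_of_nonneg (a := ((a.toNat ||| c.toNat : Nat) : Int)) (Int.natCast_nonneg _)
      (Int.natCast_nonneg _)]
  simp only [Int.toNat_natCast]
  congr 1
  calc a.toNat ||| b.toNat ||| (c.toNat ||| d.toNat)
      = a.toNat ||| (b.toNat ||| (c.toNat ||| d.toNat)) := Nat.lor_assoc ..
    _ = a.toNat ||| (b.toNat ||| c.toNat ||| d.toNat) := by rw [Nat.lor_assoc]
    _ = a.toNat ||| (c.toNat ||| b.toNat ||| d.toNat) := by rw [Nat.lor_comm b.toNat]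
    _ = a.toNat ||| (c.toNat ||| (b.toNat ||| d.toNat)) := by rw [Nat.lor_assoc]
    _ = a.toNat ||| c.toNat ||| (b.toNat ||| d.toNat) := (Nat.lor_assoc ..).symm

theorem pvC_nonneg {w l : Int} (hw : 0 ≤ w) (hl : 0 ≤ l) : 0 ≤ pvC w l := by
  unfold pvC
  rw [PySem.Int.floordiv_eq_ediv_of_pos (by norm_num)]
  exact Int.ediv_nonneg (by positivity) (by norm_num)

theorem pvRuns_nonneg (i : Nat) (w : Int) (hw : 0 ≤ w) :
    ∀ (xs : List Int) (l : Int), 0 ≤ l → 0 ≤ pvRuns i w xs l := by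
  intro xs
  induction xs with
  | nil =>
    intro l hl
    rw [pvRuns_nil]
    split
    · exact pvC_nonneg hw hl
    · exact le_refl 0
  | cons x t ih =>
    intro l hl
    rw [pvRuns_cons]
    split
    · exact ih (l + 1) (by omega)
    · refine pv_bor_nonneg ?_ (ih 0 (le_refl 0))
      split
      · exact pvC_nonneg hw hl
      · exact le_refl 0

theorem pvBig_nonneg (xs : List Int) : ∀ (run : List Int) (i : Nat),
    (∀ r ∈ run, 0 ≤ r) → 0 ≤ pvBig xs i run := by
  intro run
  induction run with
  | nil => intro i _; exact le_refl 0
  | cons r rs ih =>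
    intro i h
    rw [pvBig_consr]
    exact pv_bor_nonneg
      (pvRuns_nonneg i _ (pv_shl_nonneg i) xs r (h r (by simp)))
      (ih (i+1) (fun r hr => h r (by simp [hr])))

theorem pvOrD_nonneg (x : Int) : ∀ (run : List Int) (i : Nat),
    (∀ r ∈ run, 0 ≤ r) → 0 ≤ pvOrD x i run := by
  intro run
  induction run with
  | nil => intro i _; exact le_refl 0
  | cons r rs ih =>
    intro i h
    rw [pvOrD_cons]
    refine pv_bor_nonneg ?_ (ih (i+1) (fun r hr => h r (by simp [hr])))
    split
    · exact le_refl 0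
    · split
      · exact pvC_nonneg (pv_shl_nonneg i) (h r (by simp))
      · exact le_refl 0

theorem pvFlushOr_nonneg : ∀ (run : List Int) (i : Nat),
    (∀ r ∈ run, 0 ≤ r) → 0 ≤ pvFlushOr i run := by
  intro run
  induction run with
  | nil => intro i _; exact le_refl 0
  | cons r rs ih =>
    intro i h
    rw [pvFlushOr_cons]
    refine pv_bor_nonneg ?_ (ih (i+1) (fun r hr => h r (by simp [hr])))
    split
    · exact pvC_nonneg (pv_shl_nonneg i) (h r (by simp))
    · exact le_refl 0

theorem pvUpd_nonneg (x : Int) : ∀ (run : List Int) (i : Nat),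
    (∀ r ∈ run, 0 ≤ r) → ∀ r ∈ pvUpd x i run, 0 ≤ r := by
  intro run
  induction run with
  | nil => intro i _; simp [pvUpd_nil]
  | cons a as ih =>
    intro i h r hrm
    rw [pvUpd_cons] at hrm
    rcases List.mem_cons.mp hrm with h1 | h2
    · subst h1; have := h a (by simp); split <;> omega
    · exact ih (i+1) (fun r hr => h r (by simp [hr])) r h2

theorem pv_band_pos_iff (x : Int) (i : Nat) :
    (0 < PySem.Int.band x ((1:Int) <<< i)) ↔ pvBit x i = true := by
  have h0 : 0 ≤ PySem.Int.band x ((1:Int) <<< i) := by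
    rw [PySem.Int.band_comm]
    exact PySem.Int.band_nonneg_of_nonneg_left _ (pv_shl_nonneg i)
  unfold pvBit
  simp only [ne_eq, decide_eq_true_eq]
  omega

-- A's inner loop (over the already-fetched elements xs) computes S ||| pvRuns
theorem pv_innerA (i : Nat) (m : Int) (hm : 0 ≤ m) :
    ∀ (xs : List Int) (S c l : Int), 0 ≤ S → 0 ≤ l → ((c ≠ 0) ↔ (l ≠ 0)) →
      aFlush m (xs.foldl (fun st x => aStep m i x st) (S, c, l))
        = PySem.Int.bor S (pvRuns i m xs l) := by
  intro xs
  induction xs with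
  | nil =>
    intro S c l hS hl hcl
    rw [List.foldl_nil, pvRuns_nil]
    unfold aFlush
    by_cases h : l = 0
    · have hc : ¬ (c ≠ 0) := by simpa [h] using hcl
      simp only [hc, if_false, h, ne_eq, not_true_eq_false, if_false]
      exact (PySem.Int.bor_zero S).symm
    · have hc : c ≠ 0 := hcl.mpr h
      simp only [hc, if_pos, h, ne_eq, not_false_eq_true, if_pos]
      rfl
  | cons x t ih =>
    intro S c l hS hl hcl
    rw [List.foldl_cons, pvRuns_cons]
    by_cases hb : pvBit x i = true
    · have hpos : 0 < PySem.Int.band x ((1:Int) <<< i) := (pv_band_pos_iff x i).mpr hb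
      have hstep : aStep m i x (S, c, l) = (S, (if c ≠ 0 then c else 1), l + 1) := by
        unfold aStep
        simp only [hpos, if_pos]
        split <;> simp_all
      rw [hstep, ih S _ (l+1) hS (by omega) (by split <;> omega), if_pos hb]
    · have hpos : ¬ (0 < PySem.Int.band x ((1:Int) <<< i)) := by
        rw [pv_band_pos_iff]; simp [hb]
      rw [if_neg (by simp [hb])]
      by_cases h : l = 0
      · have hc : ¬ (c ≠ 0) := by simpa [h] using hcl
        have hstep : aStep m i x (S, c, l) = (S, c, l) := by
          unfold aStep; simp [hpos, hc]
        rw [hstep, ih S c l hS hl hcl, h]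
        simp only [ne_eq, not_true_eq_false, if_false, pv_zero_bor]
      · have hc : c ≠ 0 := hcl.mpr h
        have hstep : aStep m i x (S, c, l) = (PySem.Int.bor S (pvC m l), 0, 0) := by
          unfold aStep pvC
          simp only [hpos, if_false]
          rw [if_pos hc]
        rw [hstep, ih _ 0 0 (pv_bor_nonneg hS (pvC_nonneg hm hl)) (le_refl 0) (by simp)]
        rw [if_pos h]
        exact pv_bor_assoc hS (pvC_nonneg hm hl) (pvRuns_nonneg i m hm t 0 (le_refl 0))

-- A's outer loop over the bits i0, i0+1, …
theorem pv_outerA (xs : List Int) :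
    ∀ (k : Nat) (i0 : Nat) (S : Int), 0 ≤ S →
      ((List.range' i0 k).foldl (fun acc i =>
          (aFlush acc.2 (xs.foldl (fun st x => aStep acc.2 i x st) (acc.1, 0, 0)), acc.2 * 2))
        (S, (1:Int) <<< i0)).1
      = PySem.Int.bor S (pvBig xs i0 (List.replicate k 0)) := by
  intro k
  induction k with
  | zero =>
    intro i0 S hS
    simp only [List.range', List.foldl_nil, List.replicate, pvBig_nil]
    exact (PySem.Int.bor_zero S).symm
  | succ k ih =>
    intro i0 S hS
    have hrange : List.range' i0 (k+1) = i0 :: List.range' (i0+1) k := by simp [List.range']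
    rw [hrange, List.foldl_cons]
    have h1 : 0 ≤ pvRuns i0 ((1:Int) <<< i0) xs 0 :=
      pvRuns_nonneg i0 _ (pv_shl_nonneg i0) xs 0 (le_refl 0)
    rw [show (aFlush ((S, (1:Int) <<< i0).2 : Int)
        (xs.foldl (fun st x => aStep ((S, (1:Int) <<< i0).2) i0 x st)
          (((S, (1:Int) <<< i0).1 : Int), 0, 0)), ((S, (1:Int) <<< i0).2 : Int) * 2)
      = (PySem.Int.bor S (pvRuns i0 ((1:Int) <<< i0) xs 0), (1:Int) <<< (i0+1)) from by
        rw [show (((S, (1:Int) <<< i0).1 : Int), (0:Int), (0:Int))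
            = ((S : Int), (0:Int), (0:Int)) from rfl]
        rw [pv_innerA i0 ((1:Int) <<< i0) (pv_shl_nonneg i0) xs S 0 0 hS (le_refl 0) (by simp)]
        have hmul : ((1:Int) <<< i0) * 2 = (1:Int) <<< (i0+1) := by
          simp [Int.shiftLeft_eq]; ring
        rw [hmul]]
    rw [ih (i0+1) _ (pv_bor_nonneg hS h1), List.replicate_succ, pvBig_consr]
    exact pv_bor_assoc hS h1 (pvBig_nonneg xs (List.replicate k 0) (i0+1) (by simp))

-- B's per-element walk over the run list = independent per-bit updates plus one OR-delta
theorem pv_bRow (x : Int) :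
    ∀ (run : List Int) (i : Nat) (S : Int), 0 ≤ S → (∀ r ∈ run, 0 ≤ r) →
      bStepRow x i run S = (PySem.Int.bor S (pvOrD x i run), pvUpd x i run) := by
  intro run
  induction run with
  | nil =>
    intro i S hS _
    rw [bStepRow_nil, pvOrD_nil, pvUpd_nil, PySem.Int.bor_zero]
  | cons r rs ih =>
    intro i S hS h
    have hr : 0 ≤ r := h r (by simp)
    have hrs : ∀ r ∈ rs, 0 ≤ r := fun r hr => h r (by simp [hr])
    rw [bStepRow_cons, pvOrD_cons, pvUpd_cons]
    by_cases hb : pvBit x i = true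
    · have hb' : PySem.Int.band x ((1:Int) <<< i) ≠ 0 := by simpa [pvBit] using hb
      rw [if_pos hb', ih (i+1) S hS hrs]
      simp only [hb, if_pos, pv_zero_bor]
    · have hb' : ¬ (PySem.Int.band x ((1:Int) <<< i) ≠ 0) := by simpa [pvBit] using hb
      rw [if_neg hb']
      by_cases hr0 : r ≠ 0
      · rw [if_pos hr0,
          show PySem.Int.floordiv (((1:Int) <<< i) * r * (r + 1)) 2 = pvC ((1:Int) <<< i) r
            from rfl,
          ih (i+1) _ (pv_bor_nonneg hS (pvC_nonneg (pv_shl_nonneg i) hr)) hrs]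
        simp only [hb, Bool.false_eq_true, if_false]
        rw [if_pos hr0,
          pv_bor_assoc hS (pvC_nonneg (pv_shl_nonneg i) hr) (pvOrD_nonneg x rs (i+1) hrs)]
      · rw [if_neg hr0, ih (i+1) S hS hrs]
        have hr00 : r = 0 := by omega
        subst hr00
        simp only [hb, Bool.false_eq_true, if_false, ne_eq, not_true_eq_false, pv_zero_bor]

theorem pv_bFlush :
    ∀ (run : List Int) (i : Nat) (S : Int), 0 ≤ S → (∀ r ∈ run, 0 ≤ r) →
      bFlush i run S = PySem.Int.bor S (pvFlushOr i run) := by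
  intro run
  induction run with
  | nil => intro i S hS _; rw [bFlush_nil, pvFlushOr_nil, PySem.Int.bor_zero]
  | cons r rs ih =>
    intro i S hS h
    have hr : 0 ≤ r := h r (by simp)
    have hrs : ∀ r ∈ rs, 0 ≤ r := fun r hr => h r (by simp [hr])
    rw [bFlush_cons, pvFlushOr_cons]
    by_cases hr0 : r ≠ 0
    · rw [if_pos hr0, if_pos hr0,
        show PySem.Int.floordiv (((1:Int) <<< i) * r * (r + 1)) 2 = pvC ((1:Int) <<< i) r
          from rfl,
        ih (i+1) _ (pv_bor_nonneg hS (pvC_nonneg (pv_shl_nonneg i) hr)) hrs]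
      exact pv_bor_assoc hS (pvC_nonneg (pv_shl_nonneg i) hr) (pvFlushOr_nonneg rs (i+1) hrs)
    · rw [if_neg hr0, if_neg hr0, ih (i+1) S hS hrs, pv_zero_bor]

theorem pv_flushOr_eq (run : List Int) : ∀ i : Nat, pvFlushOr i run = pvBig [] i run := by
  induction run with
  | nil => intro i; rfl
  | cons r rs ih =>
    intro i
    rw [pvFlushOr_cons, pvBig_consr, pvRuns_nil, ih (i+1)]

theorem pvRuns_step (i : Nat) (w : Int) (x : Int) (t : List Int) (r : Int) :
    pvRuns i w (x :: t) r
      = PySem.Int.bor (if pvBit x i then 0 else if r ≠ 0 then pvC w r else 0)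
          (pvRuns i w t (if pvBit x i then r + 1 else 0)) := by
  rw [pvRuns_cons]
  by_cases hb : pvBit x i = true
  · simp only [hb, if_pos, pv_zero_bor]
  · simp only [hb, Bool.false_eq_true, if_false]

theorem pvBig_cons (x : Int) (t : List Int) :
    ∀ (run : List Int) (i : Nat), (∀ r ∈ run, 0 ≤ r) →
      pvBig (x :: t) i run
        = PySem.Int.bor (pvOrD x i run) (pvBig t i (pvUpd x i run)) := by
  intro run
  induction run with
  | nil => intro i _; rw [pvBig_nil, pvOrD_nil, pvUpd_nil, pvBig_nil, PySem.Int.bor_zero]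
  | cons r rs ih =>
    intro i h
    have hr : 0 ≤ r := h r (by simp)
    have hrs : ∀ r ∈ rs, 0 ≤ r := fun r hr => h r (by simp [hr])
    have hupd : 0 ≤ (if pvBit x i then r + 1 else 0) := by split <;> omega
    rw [pvBig_consr, pvOrD_cons, pvUpd_cons, pvBig_consr, pvRuns_step, ih (i+1) hrs]
    exact pv_bor_bor_bor
      (by split
          · exact le_refl 0
          · split
            · exact pvC_nonneg (pv_shl_nonneg i) hr
            · exact le_refl 0)
      (pvRuns_nonneg i _ (pv_shl_nonneg i) t _ hupd)
      (pvOrD_nonneg x rs (i+1) hrs)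
      (pvBig_nonneg t (pvUpd x (i+1) rs) (i+1) (pvUpd_nonneg x rs (i+1) hrs))

-- B's main loop
theorem pv_coreB :
    ∀ (xs : List Int) (run : List Int) (S : Int), 0 ≤ S → (∀ r ∈ run, 0 ≤ r) →
      bFlush 0 (xs.foldl (fun st x => bStepRow x 0 st.2 st.1) (S, run)).2
          (xs.foldl (fun st x => bStepRow x 0 st.2 st.1) (S, run)).1
        = PySem.Int.bor S (pvBig xs 0 run) := by
  intro xs
  induction xs with
  | nil =>
    intro run S hS h
    simp only [List.foldl_nil]
    rw [pv_bFlush run 0 S hS h, pv_flushOr_eq run 0]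
  | cons x t ih =>
    intro run S hS h
    simp only [List.foldl_cons]
    rw [pv_bRow x run 0 S hS h]
    rw [ih (pvUpd x 0 run) _ (pv_bor_nonneg hS (pvOrD_nonneg x run 0 h)) (pvUpd_nonneg x run 0 h)]
    rw [pvBig_cons x t run 0 h]
    exact pv_bor_assoc hS (pvOrD_nonneg x run 0 h)
      (pvBig_nonneg t (pvUpd x 0 run) 0 (pvUpd_nonneg x run 0 h))

-- both ports equal the model, on every input
theorem pv_A_eq_model (arr : List Int) (n : Int) :
    findAndSum arr n
      = pvBig ((PySem.List.pyRange 0 n 1).map (fun j => PySem.List.pyGetD arr j 0)) 0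
          (List.replicate 30 0) := by
  unfold findAndSum
  have hbody : (fun (acc : Int × Int) (i : Nat) =>
      (aFlush acc.2 ((PySem.List.pyRange 0 n 1).foldl
          (fun st j => aStep acc.2 i (PySem.List.pyGetD arr j 0) st) (acc.1, 0, 0)),
       acc.2 * 2))
      = (fun (acc : Int × Int) (i : Nat) =>
      (aFlush acc.2 (((PySem.List.pyRange 0 n 1).map (fun j => PySem.List.pyGetD arr j 0)).foldl
          (fun st x => aStep acc.2 i x st) (acc.1, 0, 0)),
       acc.2 * 2)) := by
    funext acc i
    rw [List.foldl_map]
  rw [hbody, List.range_eq_range']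
  have h30 := pv_outerA ((PySem.List.pyRange 0 n 1).map (fun j => PySem.List.pyGetD arr j 0))
    30 0 0 (le_refl 0)
  rw [show ((1:Int) <<< (0:Nat)) = 1 from rfl] at h30
  rw [h30, pv_zero_bor]

theorem pv_B_eq_model (arr : List Int) (n : Int) :
    findAndSum_alt arr n
      = pvBig ((PySem.List.pyRange 0 n 1).map (fun j => PySem.List.pyGetD arr j 0)) 0
          (List.replicate 30 0) := by
  show bFlush 0 ((PySem.List.pyRange 0 n 1).foldl
      (fun st j => bStepRow (PySem.List.pyGetD arr j 0) 0 st.2 st.1)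
      ((0:Int), List.replicate 30 (0:Int))).2
    ((PySem.List.pyRange 0 n 1).foldl
      (fun st j => bStepRow (PySem.List.pyGetD arr j 0) 0 st.2 st.1)
      ((0:Int), List.replicate 30 (0:Int))).1 = _
  have hcore := pv_coreB ((PySem.List.pyRange 0 n 1).map (fun j => PySem.List.pyGetD arr j 0))
    (List.replicate 30 0) 0 (le_refl 0) (by simp)
  rw [List.foldl_map] at hcore
  exact hcore.trans (pv_zero_bor _)

-- ===== VERDICT (by name: the statement is the Claim_ definition above) =====
theorem findAndSum_spec : Claim_equal_findAndSum := by
  intro arr n _ _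
  unfold Spec_findAndSum
  rw [pv_A_eq_model, pv_B_eq_model]
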